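-- pv_equiv track=rewrite | github.com/huilizhou/Leetcode-pyhton | algorithms/Written_Examination/201903_04/2019.04.07_tencent_02.py | count
-- ===== SOURCE A (Python) =====
-- def count(n, A):
--     res = 0
--     N = int(n)
--     a = A
--     for i in range(N - 1):
--         res += abs(a[i])
--         a[i + 1] = a[i] + a[i + 1]
--     return res
-- ===== SOURCE B (Python) =====
-- def count(n, A):
--     N = int(n)
--     return sum(abs(sum(A[:i + 1])) for i in range(N - 1))
-- ===== Notes on version B (the rewrite author's own statement) =====
-- stated objective: simpler
-- what changed: Replaces A's stateful loop (running prefix accumulated by mutating A in place) with a direct one-line formula that recomputes each prefix sum from scratch by an inner slice-sum, so B keeps no running state and does not mutate A.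
import Mathlib
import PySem

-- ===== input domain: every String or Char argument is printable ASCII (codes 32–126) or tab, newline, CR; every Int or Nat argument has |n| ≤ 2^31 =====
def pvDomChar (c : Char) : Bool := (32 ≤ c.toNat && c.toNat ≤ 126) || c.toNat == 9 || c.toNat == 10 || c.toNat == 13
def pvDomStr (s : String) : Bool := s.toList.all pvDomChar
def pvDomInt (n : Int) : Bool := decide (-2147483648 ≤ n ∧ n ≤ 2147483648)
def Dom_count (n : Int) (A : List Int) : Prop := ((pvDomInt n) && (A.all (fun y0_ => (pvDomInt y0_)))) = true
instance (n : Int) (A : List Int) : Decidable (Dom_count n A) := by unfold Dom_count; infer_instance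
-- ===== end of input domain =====

-- B replaces A's stateful mutating loop by a direct stateless formula (each prefix sum
-- recomputed by an inner slice-sum); A mutates A[1:n] in Python while B does not, so the
-- equivalence proved here is about the RETURN value only.

-- ===== PORT A =====
def count (n : Int) (A : List Int) : Int :=
  ((PySem.List.pyRange 0 (n - 1) 1).foldl
    (fun (st : Int × List Int) i =>
      (st.1 + |PySem.List.pyGetD st.2 i 0|,
       PySem.List.pySetD st.2 (i + 1)
         (PySem.List.pyGetD st.2 i 0 + PySem.List.pyGetD st.2 (i + 1) 0)))
    (0, A)).1

-- ===== PORT B =====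
def count_alt (n : Int) (A : List Int) : Int :=
  ((PySem.List.pyRange 0 (n - 1) 1).map
    (fun i => |(PySem.List.slice A none (some (i + 1))).sum|)).sum

-- ===== PRECONDITION & SPEC =====
-- Pre_ excludes exactly the inputs (2 ≤ n and n > len(A)) on which Python A raises IndexError.
def Pre_count (n : Int) (A : List Int) : Prop := n ≤ 1 ∨ n ≤ (A.length : Int)
instance (n : Int) (A : List Int) : Decidable (Pre_count n A) := by unfold Pre_count; infer_instance
def pvWitness_count : Int × List Int := (3, [2, -5, 4])

def Spec_count (n : Int) (A : List Int) (out : Int) : Prop := out = count_alt n A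
instance (n : Int) (A : List Int) (out : Int) : Decidable (Spec_count n A out) := by unfold Spec_count; infer_instance

-- ===== CLAIM (what is proved, stated in full; the proofs are below) =====
def Claim_equal_count : Prop := ∀ (n : Int) (A : List Int), Dom_count n A → Pre_count n A → Spec_count n A (count n A)

-- ===== LEMMAS AND PROOFS =====

-- prefix-sum list starting from accumulator t (A's loop writes these values into a)
def pfxList (t : Int) : List Int → List Int
  | [] => []
  | x :: xs => (t + x) :: pfxList (t + x) xs
theorem length_pfxList (t : Int) (A : List Int) : (pfxList t A).length = A.length := by
  induction A generalizing t with
  | nil => rfl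
  | cons x xs ih => simp [pfxList, ih]
theorem pfxList_getElem (t : Int) (A : List Int) (i : Nat) (h : i < A.length)
    (h' : i < (pfxList t A).length) :
    (pfxList t A)[i] = t + (A.take (i + 1)).sum := by
  induction A generalizing t i with
  | nil => simp at h
  | cons x xs ih =>
    cases i with
    | zero => simp [pfxList]
    | succ j =>
      simp only [pfxList, List.getElem_cons_succ, List.take_succ_cons, List.sum_cons]
      rw [ih (t + x) j (by simpa using h) (by simp [length_pfxList]; simpa using h)]
      ring

theorem aloop_inv (A : List Int) (m : Nat) (h : m + 1 ≤ A.length) :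
    (PySem.List.pyRange 0 (m : Int) 1).foldl
      (fun (st : Int × List Int) i =>
        (st.1 + |PySem.List.pyGetD st.2 i 0|,
         PySem.List.pySetD st.2 (i + 1)
           (PySem.List.pyGetD st.2 i 0 + PySem.List.pyGetD st.2 (i + 1) 0)))
      (0, A)
    = ((((pfxList 0 A).take m).map (fun x => |x|)).sum,
       (pfxList 0 A).take (m + 1) ++ A.drop (m + 1)) := by
  have hlenP : (pfxList 0 A).length = A.length := length_pfxList 0 A
  induction m with
  | zero =>
    rw [PySem.List.pyRange_one_eq_nil (by norm_num)]
    simp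
    obtain ⟨x, xs, rfl⟩ : ∃ x xs, A = x :: xs := by
      cases A with
      | nil => simp at h
      | cons x xs => exact ⟨x, xs, rfl⟩
    simp [pfxList]
  | succ k ih =>
    have hk : k + 1 ≤ A.length := by omega
    have hcast : ((k + 1 : Nat) : Int) = (k : Int) + 1 := by push_cast; ring
    have hmin : min (k + 1) A.length = k + 1 := by omega
    have hd : A.drop (k + 1) = A[k+1]'(by omega) :: A.drop (k + 1 + 1) :=
      List.drop_eq_getElem_cons (by omega)
    rw [hcast, PySem.List.pyRange_one_succ_right (by positivity), List.foldl_append, ih hk]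
    have hget1 : PySem.List.pyGetD ((pfxList 0 A).take (k + 1) ++ A.drop (k + 1)) (k : Int) 0
        = (pfxList 0 A)[k]'(by omega) := by
      rw [PySem.List.pyGetD_natCast, List.getD_eq_getElem _ _ (by simp [hlenP] <;> omega),
        List.getElem_append_left (by simp [hlenP] <;> omega)]
      simp
    have hget2 : PySem.List.pyGetD ((pfxList 0 A).take (k + 1) ++ A.drop (k + 1)) ((k : Int) + 1) 0
        = A[k+1]'(by omega) := by
      have hc : ((k : Int) + 1) = ((k + 1 : Nat) : Int) := by push_cast; ring
      rw [hd, hc, PySem.List.pyGetD_natCast, List.getD_eq_getElem _ _ (by simp [hlenP] <;> omega),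
        List.getElem_append_right (by simp [hlenP] <;> omega)]
      simp [hlenP, hmin]
    have hPk1 : (pfxList 0 A)[k+1]'(by omega) = (pfxList 0 A)[k]'(by omega) + A[k+1]'(by omega) := by
      rw [pfxList_getElem 0 A (k+1) (by omega) (by omega),
        pfxList_getElem 0 A k (by omega) (by omega),
        List.sum_take_succ A (k+1) (by omega)]
      ring
    have hset : PySem.List.pySetD ((pfxList 0 A).take (k + 1) ++ A.drop (k + 1)) ((k : Int) + 1)
          ((pfxList 0 A)[k]'(by omega) + A[k+1]'(by omega))
        = (pfxList 0 A).take (k + 1 + 1) ++ A.drop (k + 1 + 1) := by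
      have hc : ((k : Int) + 1) = ((k + 1 : Nat) : Int) := by push_cast; ring
      rw [hc, PySem.List.pySetD_natCast,
        List.set_append_right _ _ (by simp [hlenP] <;> omega), hd]
      have hidx : (k + 1) - ((pfxList 0 A).take (k + 1)).length = 0 := by
        rw [List.length_take, hlenP, hmin]; omega
      rw [hidx, List.set_cons_zero, ← hPk1,
        ← List.take_concat_get' (pfxList 0 A) (k+1) (by rw [hlenP]; omega),
        List.append_assoc]
      rfl
    simp only [List.foldl_cons, List.foldl_nil, hget1, hget2, hset]
    congr 1
    simp only [List.map_take]
    rw [List.sum_take_succ _ k (by simp [hlenP] <;> omega)]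
    simp

-- B's summand list is exactly the absolute values of the first M prefix sums
theorem bmap (A : List Int) (M : Nat) (h : M ≤ A.length) :
    ((PySem.List.pyRange 0 (M : Int) 1).map
      (fun i => |(PySem.List.slice A none (some (i + 1))).sum|))
      = ((pfxList 0 A).take M).map (fun x => |x|) := by
  rw [PySem.List.pyRange_one]
  simp only [sub_zero, Int.toNat_natCast, List.map_map]
  apply List.ext_getElem
  · simp [length_pfxList]; omega
  · intro i h1 h2
    simp only [List.getElem_map, Function.comp_apply, List.getElem_take, List.getElem_range]
    have hc : (0 : Int) + (i : Int) + 1 = ((i + 1 : Nat) : Int) := by push_cast; ring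
    rw [hc, PySem.List.slice_to_natCast,
      pfxList_getElem 0 A i (by simp at h1; omega) (by rw [length_pfxList]; simp at h1; omega)]
    simp

theorem count_spec : Claim_equal_count := by
  intro n A _ hp
  unfold Spec_count count count_alt
  by_cases hn : n ≤ 1
  · rw [PySem.List.pyRange_one_eq_nil (by omega)]
    simp
  · have hlen : n ≤ (A.length : Int) := by
      unfold Pre_count at hp
      rcases hp with h1 | h2
      · omega
      · exact h2
    obtain ⟨M, hM⟩ : ∃ M : Nat, (M : Int) = n - 1 := ⟨(n - 1).toNat, by omega⟩
    have hM2 : M + 1 ≤ A.length := by omega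
    rw [← hM, aloop_inv A M hM2, bmap A M (by omega)]
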